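-- pv_equiv track=rewrite | github.com/blackjackal982/Mission-RND | finaltest_problem3.py | jumble
-- ===== SOURCE A (Python) =====
-- def gen(n):
--     flag = 0
--     i = n
--     while True:
--         if flag == 0:
--             yield(i)
--             i = i-1
--         if flag == 1:
--             yield(i)
--             i = i+1
--         if i == n:
--             yield(i)
--             flag = 0
--         if i == 0:
--             yield(i)
--             flag = 1
--
-- def jumble(text, n):
--     if n<=0:
--         raise ValueError
--     if type(text).__name__!="str" or text == "":
--         raise TypeError
--     li_text = list(text)
--     Gen = gen(n)
--     new = []
--     for i in range(n):
--         new.append([])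
--     while len(li_text)>0:
--         val = next(Gen)
--         if val!=0:
--             chars = li_text[0:val]
--             new[val-1].append("".join(chars))
--             for i in chars:
--                 li_text.remove(i)
--     mod = ""
--     for i in new:
--         mod += "".join(i)
--     return mod
-- ===== SOURCE B (Python) =====
-- def jumble(text, n):
--     if n <= 0:
--         raise ValueError
--     if type(text).__name__ != "str" or text == "":
--         raise TypeError
--     sizes = list(range(n, 0, -1)) + list(range(1, n + 1))
--     buckets = [[] for _ in range(n)]
--     rem = text
--     q = 0
--     while rem:
--         s = sizes[q % (2 * n)]
--         buckets[s - 1].append(rem[:s])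
--         rem = rem[s:]
--         q += 1
--     return "".join("".join(b) for b in buckets)
-- ===== Notes on version B (the rewrite author's own statement) =====
-- stated objective: faster
-- what changed: Replaces A's infinite zigzag generator (state machine with skipped zero yields) and per-character list.remove deletion with a precomputed cyclic size table [n..1]+[1..n] walked by prefix slicing of the remaining string.
-- outside the precondition, e.g. on jumble('abc', 0): A raises ValueError, B raises ValueError; on jumble('', 2): A raises TypeError, B raises TypeError
import Mathlib
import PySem

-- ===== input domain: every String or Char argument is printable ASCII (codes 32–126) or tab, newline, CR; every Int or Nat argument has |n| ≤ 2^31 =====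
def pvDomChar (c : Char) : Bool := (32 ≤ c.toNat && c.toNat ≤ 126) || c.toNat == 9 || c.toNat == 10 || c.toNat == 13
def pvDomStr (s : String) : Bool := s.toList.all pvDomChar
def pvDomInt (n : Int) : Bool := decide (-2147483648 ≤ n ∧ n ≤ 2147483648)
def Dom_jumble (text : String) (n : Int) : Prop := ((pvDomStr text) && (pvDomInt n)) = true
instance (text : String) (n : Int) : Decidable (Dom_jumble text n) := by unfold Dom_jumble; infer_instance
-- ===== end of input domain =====

-- B replaces A's generator state machine and per-char list.remove with a precomputed
-- cyclic size table and prefix slicing; measurably faster on long inputs.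

-- ===== PORT A =====
-- buckets are List (List (List Char)); strings are carried as List Char and packed at the end
def pvAppendAt (bs : List (List (List Char))) (k : Int) (s : List Char) : List (List (List Char)) :=
  if k < 0 then bs else bs.modify k.toNat (· ++ [s])

-- one iteration of gen's 'while True' body: the list of yielded values and the new (flag, i)
def pvGenStep (n flag i : Int) : List Int × Int × Int :=
  let p1 := if flag = 0 then ([i], i - 1) else (([] : List Int), i)
  let p2 := if flag = 1 then (p1.1 ++ [p1.2], p1.2 + 1) else p1
  let p3 := if p2.2 = n then (p2.1 ++ [p2.2], (0 : Int)) else (p2.1, flag)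
  let p4 := if p2.2 = 0 then (p3.1 ++ [p2.2], (1 : Int)) else p3
  (p4.1, p4.2, p2.2)

-- next(Gen): take from pending yields, else run one body iteration (which always yields)
def pvPull (n flag i : Int) (pending : List Int) : Int × List Int × Int × Int :=
  match pending with
  | v :: rest => (v, rest, flag, i)
  | [] =>
    match pvGenStep n flag i with
    | (v :: rest, fl, i') => (v, rest, fl, i')
    | ([], fl, i') => (0, [], fl, i')   -- unreachable guard: a body iteration always yields

-- the 'while len(li_text)>0' loop; the fuel only totalizes (proven sufficient below)
def pvLoopA (n : Int) (fuel : Nat) (lt : List Char) (bs : List (List (List Char)))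
    (flag i : Int) (pending : List Int) : List (List (List Char)) :=
  match fuel with
  | 0 => bs
  | fuel + 1 =>
    if lt.length > 0 then
      match pvPull n flag i pending with
      | (v, pend, fl, i') =>
        if v ≠ 0 then
          let chars := PySem.List.slice lt (some 0) (some v)
          let bs' := pvAppendAt bs (v - 1) chars
          let lt' := chars.foldl (fun l c => (PySem.List.remove? l c).getD l) lt
          pvLoopA n fuel lt' bs' fl i' pend
        else pvLoopA n fuel lt bs fl i' pend
    else bs

def jumble (text : String) (n : Int) : String :=
  if n ≤ 0 then "" else                      -- Python: raise ValueError (outside Pre_)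
  if text = "" then "" else                  -- Python: raise TypeError (outside Pre_)
  let lt := text.toList
  let new := (PySem.List.pyRange 0 n 1).foldl (fun acc _ => acc ++ [([] : List (List Char))]) []
  let res := pvLoopA n (3 * lt.length + 4) lt new 0 n []
  String.ofList (res.foldl (fun m b => m ++ b.flatten) [])

-- ===== PORT B =====
def pvSizes (n : Int) : List Int :=
  PySem.List.pyRange n 0 (-1) ++ PySem.List.pyRange 1 (n + 1) 1

-- termination helper for pvLoopB: every table entry is a positive size
theorem pvSizes_pos {n s : Int} (h : s ∈ pvSizes n) : 1 ≤ s := by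
  rcases List.mem_append.1 h with h' | h'
  · exact (PySem.List.mem_pyRange_neg_one.1 h').1
  · have := PySem.List.mem_pyRange_one.1 h'
    omega

def pvLoopB (n : Int) (bs : List (List (List Char))) (rem : List Char) (q : Int) :
    List (List (List Char)) :=
  if _hrem : rem = [] then bs else
    match hs : PySem.List.pyGet? (pvSizes n) (PySem.Int.mod q (2 * n)) with
    | none => bs                              -- unreachable for n ≥ 1
    | some s =>
      let bs' := pvAppendAt bs (s - 1) (PySem.List.slice rem none (some s))
      pvLoopB n bs' (PySem.List.slice rem (some s) none) (q + 1)
termination_by rem.length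
decreasing_by
  have hs1 : 1 ≤ s := pvSizes_pos (PySem.List.mem_of_pyGet?_eq_some (xs := pvSizes n) hs)
  simp only [PySem.List.slice_from rem (show (0:Int) ≤ s by omega)]
  have hne : rem.length ≠ 0 := by simp [_hrem]
  simp only [List.length_drop]
  omega

def jumble_alt (text : String) (n : Int) : String :=
  if n ≤ 0 then "" else
  if text = "" then "" else
  let bs := List.replicate n.toNat ([] : List (List Char))
  let res := pvLoopB n bs text.toList 0
  String.ofList (res.map List.flatten).flatten

-- ===== PRECONDITION & SPEC =====
-- Pre_ excludes exactly the inputs where Python A raises: n ≤ 0 (ValueError) and text == "" (TypeError).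
def Pre_jumble (text : String) (n : Int) : Prop := 1 ≤ n ∧ text ≠ ""
instance (text : String) (n : Int) : Decidable (Pre_jumble text n) := by unfold Pre_jumble; infer_instance
def pvWitness_jumble : String × Int := ("abcdef", 2)

def Spec_jumble (text : String) (n : Int) (out : String) : Prop := out = jumble_alt text n
instance (text : String) (n : Int) (out : String) : Decidable (Spec_jumble text n out) := by unfold Spec_jumble; infer_instance

-- ===== CLAIM =====
def Claim_equal_jumble : Prop := ∀ (text : String) (n : Int), Dom_jumble text n → Pre_jumble text n → Spec_jumble text n (jumble text n)

-- ===== LEMMAS AND PROOFS =====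

-- Python's %: for a positive divisor it is Lean's emod
theorem pv_mod_pos (q d : Int) (hd : 0 < d) : PySem.Int.mod q d = q % d := by
  simp [PySem.Int.mod, Int.fmod_eq_emod, hd.le]

-- removing, one by one, each char of the prefix of lt from lt leaves exactly the suffix
theorem pv_remove_take : ∀ (k : Nat) (lt : List Char),
    (lt.take k).foldl (fun l c => (PySem.List.remove? l c).getD l) lt = lt.drop k := by
  intro k
  induction k with
  | zero => intro lt; simp
  | succ k ih =>
    intro lt
    cases lt with
    | nil => simp
    | cons c rest =>
      simp only [List.take_succ_cons, List.foldl_cons, List.drop_succ_cons,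
        PySem.List.remove?_cons_self, Option.getD_some]
      exact ih rest

-- 'for i in range(n): new.append([])' builds n empty buckets
theorem pv_foldl_append_const {α β : Type} (l : List β) (x : α) :
    ∀ (init : List α), l.foldl (fun acc _ => acc ++ [x]) init = init ++ List.replicate l.length x := by
  induction l with
  | nil => intro init; simp
  | cons b bs ih =>
    intro init
    simp only [List.foldl_cons, List.length_cons, List.replicate_succ, ih]
    simp

-- 'mod += "".join(i)' over the buckets is flatten-of-map-flatten
theorem pv_foldl_flatten (l : List (List (List Char))) :
    ∀ (init : List Char), l.foldl (fun m b => m ++ b.flatten) init = init ++ (l.map List.flatten).flatten := by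
  induction l with
  | nil => intro init; simp
  | cons b bs ih => intro init; simp [ih]

-- the size table holds n-t at t < n and t-n+1 at n ≤ t < 2n
theorem pv_sizes_get (n t : Int) (hn : 1 ≤ n) (h0 : 0 ≤ t) (h2 : t < 2 * n) :
    PySem.List.pyGet? (pvSizes n) t = some (if t < n then n - t else t - n + 1) := by
  rw [PySem.List.pyGet?_of_nonneg _ h0]
  unfold pvSizes
  have hlen1 : (PySem.List.pyRange n 0 (-1)).length = n.toNat := by
    rw [PySem.List.length_pyRange_neg_one]; omega
  rcases lt_or_ge t n with h | h
  · rw [if_pos h, List.getElem?_append_left (by omega), PySem.List.pyRange_neg_one]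
    rw [List.getElem?_map, List.getElem?_range (by omega : t.toNat < (n - 0).toNat)]
    simp only [Option.map_some, Option.some_inj]
    omega
  · rw [if_neg (by omega), List.getElem?_append_right (by omega), PySem.List.pyRange_one]
    rw [hlen1]
    rw [List.getElem?_map, List.getElem?_range (by omega : t.toNat - n.toNat < (n + 1 - 1).toNat)]
    simp only [Option.map_some, Option.some_inj]
    omega

theorem pull_D1 (n : Int) (hn : 1 ≤ n) : pvPull n 0 1 [] = (1, [0], 1, 0) := by
  simp [pvPull, pvGenStep, show ¬((0:Int) = n) by omega]

theorem pull_D (n i : Int) (h1 : 1 < i) (h2 : i ≤ n) : pvPull n 0 i [] = (i, [], 0, i - 1) := by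
  simp [pvPull, pvGenStep, show ¬(i - 1 = n) by omega, show ¬(i - 1 = 0) by omega]

theorem pull_Z1_n1 : pvPull 1 1 0 [] = (0, [1], 0, 1) := by
  simp [pvPull, pvGenStep]

theorem pull_Z1 (n : Int) (hn : 2 ≤ n) : pvPull n 1 0 [] = (0, [], 1, 1) := by
  simp [pvPull, pvGenStep, show ¬((1:Int) = n) by omega]

theorem pull_Asc_top (n i : Int) (h1 : 1 ≤ i) (hi : i + 1 = n) :
    pvPull n 1 i [] = (i, [n], 0, n) := by
  subst hi
  simp [pvPull, pvGenStep, show ¬(i + 1 = 0) by omega]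

theorem pull_Asc (n i : Int) (h1 : 1 ≤ i) (hi : ¬(i + 1 = n)) :
    pvPull n 1 i [] = (i, [], 1, i + 1) := by
  simp [pvPull, pvGenStep, hi, show ¬(i + 1 = 0) by omega]

-- valid generator states, with the cycle position t they are about to serve
def pvVS (n : Int) (pending : List Int) (flag i t : Int) : Prop :=
  (pending = [] ∧ flag = 0 ∧ 1 ≤ i ∧ i ≤ n ∧ t = n - i)
  ∨ (pending = [0] ∧ flag = 1 ∧ i = 0 ∧ t = n)
  ∨ (pending = [] ∧ flag = 1 ∧ i = 0 ∧ t = n)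
  ∨ (pending = [] ∧ flag = 1 ∧ 1 ≤ i ∧ i ≤ n - 1 ∧ t = n + i - 1)
  ∨ (pending = [n] ∧ flag = 0 ∧ i = n ∧ t = 2 * n - 1)

-- number of zero yields still to be consumed before the next nonzero one
def pvZ (pending : List Int) (flag i : Int) : Nat :=
  if flag = 1 ∧ i = 0 then (if pending = [0] then 2 else 1) else 0

theorem pvZ_le_two (pending : List Int) (flag i : Int) : pvZ pending flag i ≤ 2 := by
  unfold pvZ; split_ifs <;> omega

-- one pull from a valid state: either a zero (state keeps position, zero-rank drops)
-- or the size the cycle prescribes at t (position advances cyclically)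
theorem pv_step (n flag i t : Int) (pending : List Int) (hn : 1 ≤ n)
    (hvs : pvVS n pending flag i t) :
    (∃ pe fl ii, pvPull n flag i pending = (0, pe, fl, ii) ∧ pvVS n pe fl ii t ∧
        pvZ pe fl ii < pvZ pending flag i)
    ∨ (∃ v pe fl ii, pvPull n flag i pending = (v, pe, fl, ii) ∧ 1 ≤ v ∧
        v = (if t < n then n - t else t - n + 1) ∧
        pvVS n pe fl ii (if t = 2 * n - 1 then 0 else t + 1)) := by
  rcases hvs with ⟨hp, hf, hi1, hi2, ht⟩ | ⟨hp, hf, hi, ht⟩ | ⟨hp, hf, hi, ht⟩ |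
    ⟨hp, hf, hi1, hi2, ht⟩ | ⟨hp, hf, hi, ht⟩
  · -- descending
    subst hp hf ht
    by_cases hi : i = 1
    · subst hi
      right
      refine ⟨1, [0], 1, 0, pull_D1 n hn, le_refl 1, ?_, ?_⟩
      · rw [if_pos (by omega)]; omega
      · rw [if_neg (by omega)]
        exact Or.inr (Or.inl ⟨rfl, rfl, rfl, by omega⟩)
    · right
      refine ⟨i, [], 0, i - 1, pull_D n i (by omega) hi2, by omega, ?_, ?_⟩
      · rw [if_pos (by omega)]; omega
      · rw [if_neg (by omega)]
        exact Or.inl ⟨rfl, rfl, by omega, by omega, by omega⟩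
  · -- Z2 : pending = [0]
    subst hp hf hi
    left
    exact ⟨[], 1, 0, rfl, Or.inr (Or.inr (Or.inl ⟨rfl, rfl, rfl, ht⟩)), by simp [pvZ]⟩
  · -- Z1
    subst hp hf hi
    by_cases h1 : n = 1
    · subst h1
      left
      refine ⟨[1], 0, 1, pull_Z1_n1, ?_, by simp [pvZ]⟩
      exact Or.inr (Or.inr (Or.inr (Or.inr ⟨rfl, rfl, rfl, by omega⟩)))
    · left
      refine ⟨[], 1, 1, pull_Z1 n (by omega), ?_, by simp [pvZ]⟩
      exact Or.inr (Or.inr (Or.inr (Or.inl ⟨rfl, rfl, le_refl 1, by omega, by omega⟩)))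
  · -- ascending
    subst hp hf
    by_cases htop : i + 1 = n
    · right
      refine ⟨i, [n], 0, n, pull_Asc_top n i hi1 htop, hi1, ?_, ?_⟩
      · rw [if_neg (by omega)]; omega
      · rw [if_neg (by omega)]
        exact Or.inr (Or.inr (Or.inr (Or.inr ⟨rfl, rfl, rfl, by omega⟩)))
    · right
      refine ⟨i, [], 1, i + 1, pull_Asc n i hi1 htop, hi1, ?_, ?_⟩
      · rw [if_neg (by omega)]; omega
      · rw [if_neg (by omega)]
        exact Or.inr (Or.inr (Or.inr (Or.inl ⟨rfl, rfl, by omega, by omega, by omega⟩)))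
  · -- pending = [n]
    subst hp hf
    right
    refine ⟨n, [], 0, i, rfl, hn, ?_, ?_⟩
    · rw [if_neg (by omega)]; omega
    · rw [if_pos ht]
      exact Or.inl ⟨rfl, rfl, by omega, by omega, by omega⟩

-- position bounds from a valid state
theorem pv_vs_t_bounds {n pending flag i t} (hn : 1 ≤ n) (h : pvVS n pending flag i t) :
    0 ≤ t ∧ t < 2 * n := by
  rcases h with ⟨_,_,h1,h2,h3⟩|⟨_,_,_,h3⟩|⟨_,_,_,h3⟩|⟨_,_,h1,h2,h3⟩|⟨_,_,_,h3⟩ <;> omega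

-- the cyclic position step matches Python's q % (2n) as q increments
theorem pv_mod_step (q n : Int) (hn : 1 ≤ n) (_hq : 0 ≤ q) :
    PySem.Int.mod (q + 1) (2 * n)
      = (if PySem.Int.mod q (2 * n) = 2 * n - 1 then 0 else PySem.Int.mod q (2 * n) + 1) := by
  have hd : (0:Int) < 2 * n := by omega
  rw [pv_mod_pos _ _ hd, pv_mod_pos _ _ hd]
  have h0 : 0 ≤ q % (2 * n) := Int.emod_nonneg q (by omega)
  have h1 : q % (2 * n) < 2 * n := Int.emod_lt_of_pos q hd
  have hadd : (q + 1) % (2 * n) = (q % (2 * n) + 1 % (2 * n)) % (2 * n) := Int.add_emod q 1 (2 * n)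
  have h1m : (1:Int) % (2 * n) = 1 := Int.emod_eq_of_lt (by omega) (by omega)
  rcases eq_or_ne (q % (2 * n)) (2 * n - 1) with h | h
  · rw [if_pos h, hadd, h1m, h]
    simp
  · rw [if_neg h, hadd, h1m]
    exact Int.emod_eq_of_lt (by omega) (by omega)

-- main loop correspondence: with enough fuel, A's loop from a valid state at position
-- q equals B's table-driven loop at counter q
theorem pv_loop_eq (n : Int) (hn : 1 ≤ n) :
    ∀ (fuel : Nat) (lt : List Char) (bs : List (List (List Char))) (flag i : Int)
      (pending : List Int) (q : Int), 0 ≤ q →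
      pvVS n pending flag i (PySem.Int.mod q (2 * n)) →
      3 * lt.length + pvZ pending flag i < fuel →
      pvLoopA n fuel lt bs flag i pending = pvLoopB n bs lt q := by
  intro fuel
  induction fuel with
  | zero =>
    intro lt bs flag i pending q _ _ hfuel
    exact absurd hfuel (by omega)
  | succ fuel ih =>
    intro lt bs flag i pending q hq hvs hfuel
    by_cases hlt : lt = []
    · subst hlt
      rw [pvLoopB]
      simp [pvLoopA]
    · have hpos : lt.length > 0 := List.length_pos_of_ne_nil hlt
      rcases pv_step n flag i _ pending hn hvs with
        ⟨pe, fl, ii, hpull, hvs', hz⟩ | ⟨v, pe, fl, ii, hpull, hv1, hveq, hvs'⟩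
      · -- a zero yield: A's loop skips, B does not move
        have hred : pvLoopA n (fuel + 1) lt bs flag i pending = pvLoopA n fuel lt bs fl ii pe := by
          simp only [pvLoopA, hpull]
          rw [if_pos hpos]
          simp
        rw [hred]
        exact ih lt bs fl ii pe q hq hvs' (by omega)
      · -- a nonzero yield v: both loops store the prefix of length v in bucket v-1
        obtain ⟨ht0, ht2⟩ := pv_vs_t_bounds hn hvs
        have hsget : PySem.List.pyGet? (pvSizes n) (PySem.Int.mod q (2 * n)) = some v := by
          rw [pv_sizes_get n _ hn ht0 ht2, hveq]
        have htake : PySem.List.slice lt none (some v) = lt.take v.toNat :=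
          PySem.List.slice_to lt (by omega)
        have hdrop : PySem.List.slice lt (some v) none = lt.drop v.toNat :=
          PySem.List.slice_from lt (by omega)
        have hA : pvLoopA n (fuel + 1) lt bs flag i pending
            = pvLoopA n fuel (lt.drop v.toNat) (pvAppendAt bs (v - 1) (lt.take v.toNat)) fl ii pe := by
          simp only [pvLoopA, hpull]
          rw [if_pos hpos, if_pos (show ¬(v = 0) by omega)]
          simp only [PySem.List.slice_zero_start, htake, pv_remove_take]
        have hB : pvLoopB n bs lt q
            = pvLoopB n (pvAppendAt bs (v - 1) (lt.take v.toNat)) (lt.drop v.toNat) (q + 1) := by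
          rw [pvLoopB, dif_neg hlt]
          split
          · rename_i heq
            rw [hsget] at heq
            cases heq
          · rename_i s heq
            rw [hsget] at heq
            injection heq with heq
            subst heq
            rw [htake, hdrop]
        rw [hA, hB]
        have hz2 := pvZ_le_two pe fl ii
        have hv : 1 ≤ v.toNat := by omega
        apply ih _ _ _ _ _ (q + 1) (by omega) _ (by simp only [List.length_drop]; omega)
        rw [pv_mod_step q n hn hq]
        exact hvs'

-- ===== VERDICT =====
theorem jumble_spec : Claim_equal_jumble := by
  intro text n _ hpre
  obtain ⟨hn, htext⟩ := hpre
  unfold Spec_jumble jumble jumble_alt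
  simp only [if_neg (show ¬ n ≤ 0 by omega), if_neg htext]
  have hinit : (PySem.List.pyRange 0 n 1).foldl (fun acc _ => acc ++ [([] : List (List Char))]) []
      = List.replicate n.toNat ([] : List (List Char)) := by
    rw [pv_foldl_append_const]
    simp [PySem.List.length_pyRange_one]
  rw [hinit]
  have hloop : pvLoopA n (3 * text.toList.length + 4) text.toList
        (List.replicate n.toNat ([] : List (List Char))) 0 n []
      = pvLoopB n (List.replicate n.toNat ([] : List (List Char))) text.toList 0 := by
    apply pv_loop_eq n hn _ _ _ _ _ _ 0 le_rfl
    · have : PySem.Int.mod 0 (2 * n) = 0 := by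
        rw [pv_mod_pos _ _ (by omega)]; simp
      rw [this]
      exact Or.inl ⟨rfl, rfl, by omega, le_rfl, by omega⟩
    · have := pvZ_le_two ([] : List Int) 0 n
      omega
  rw [hloop, pv_foldl_flatten]
  simp
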